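-- pv_equiv track=rewrite | github.com/Wang-Benjamin/rag-powered-crm | crm/services/rag/chunking.py | _build_overlap_buffer
-- ===== SOURCE A (Python) =====
-- from typing import List, Optional
--
-- def _build_overlap_buffer(prev_buffer: List[str], overlap_chars: int) -> tuple[List[str], int]:
--     """Take the last sentences from prev_buffer up to overlap_chars chars."""
--     if overlap_chars <= 0 or not prev_buffer:
--         return [], 0
--
--     overlap: List[str] = []
--     overlap_len = 0
--     for sent in reversed(prev_buffer):
--         sent_len = len(sent) + 1
--         if overlap_len + sent_len > overlap_chars and overlap:
--             break
--         overlap.insert(0, sent)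
--         overlap_len += sent_len
--     return overlap, overlap_len
-- ===== SOURCE B (Python) =====
-- from typing import List
--
-- def _build_overlap_buffer(prev_buffer: List[str], overlap_chars: int) -> tuple[List[str], int]:
--     """Prefix sums + binary search: the kept overlap is the maximal suffix whose
--     summed (len+1) cost fits in overlap_chars, keeping at least one sentence."""
--     if overlap_chars <= 0 or not prev_buffer:
--         return [], 0
--     pref = [0]
--     acc = 0
--     for s in prev_buffer:
--         acc += len(s) + 1
--         pref.append(acc)
--     total = acc
--     lo, hi = 0, len(prev_buffer) - 1
--     # smallest i with total - pref[i] <= overlap_chars, capped at len-1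
--     while lo < hi:
--         mid = (lo + hi) // 2
--         if total - pref[mid] <= overlap_chars:
--             hi = mid
--         else:
--             lo = mid + 1
--     return prev_buffer[lo:], total - pref[lo]
-- ===== Notes on version B (the rewrite author's own statement) =====
-- stated objective: faster
-- what changed: Replaced A's backward greedy scan with repeated overlap.insert(0, sent) by building a prefix-sum array once and binary-searching for the smallest start index whose suffix cost fits the budget (capped to keep at least one sentence), returning a single slice.
import Mathlib
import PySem

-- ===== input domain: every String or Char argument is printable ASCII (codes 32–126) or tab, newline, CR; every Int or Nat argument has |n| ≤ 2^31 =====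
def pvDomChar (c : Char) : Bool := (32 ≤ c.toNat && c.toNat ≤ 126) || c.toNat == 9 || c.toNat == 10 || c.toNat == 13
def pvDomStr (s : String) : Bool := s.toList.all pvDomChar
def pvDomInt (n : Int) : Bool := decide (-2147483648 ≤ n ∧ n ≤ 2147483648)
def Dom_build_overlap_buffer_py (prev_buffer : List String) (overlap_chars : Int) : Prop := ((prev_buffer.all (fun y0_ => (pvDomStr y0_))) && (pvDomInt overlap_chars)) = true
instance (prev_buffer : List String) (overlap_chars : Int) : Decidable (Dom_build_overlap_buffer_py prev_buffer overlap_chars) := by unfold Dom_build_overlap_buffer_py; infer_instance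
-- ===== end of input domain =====

-- B replaces A's backward greedy scan (with repeated insert(0, …)) by a prefix-sum
-- array and a binary search for the start of the affordable suffix; return values agree.

-- ===== PORT A =====
-- the 'for sent in reversed(prev_buffer)' loop with its break, state (overlap, overlap_len);
-- overlap.insert(0, sent) is a prepend
def pvLoopA (overlap_chars : Int) : List String → List String → Int → List String × Int
  | [], overlap, overlap_len => (overlap, overlap_len)
  | sent :: rest, overlap, overlap_len =>
    let sent_len := PySem.Str.len sent + 1
    if overlap_len + sent_len > overlap_chars ∧ overlap ≠ [] then (overlap, overlap_len)
    else pvLoopA overlap_chars rest (sent :: overlap) (overlap_len + sent_len)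

def build_overlap_buffer_py (prev_buffer : List String) (overlap_chars : Int) : List String × Int :=
  if overlap_chars ≤ 0 ∨ prev_buffer = [] then ([], 0)
  else pvLoopA overlap_chars prev_buffer.reverse [] 0

-- ===== PORT B =====
-- body of B's prefix-sum loop: pref.append(acc + len(s) + 1)
def pvPrefStep (st : List Int × Int) (s : String) : List Int × Int :=
  let acc' := st.2 + PySem.Str.len s + 1
  (st.1 ++ [acc'], acc')

-- the 'while lo < hi' binary search; lo, hi are nonnegative Python ints in range, so Nat
-- with Nat division is exact here (pref[mid] is always in range, so getD is exact)
-- mid = (lo + hi) // 2 is inlined at its two uses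
def pvBSearch (pref : List Int) (total overlap_chars : Int) (lo hi : Nat) : Nat :=
  if lo < hi then
    if total - pref.getD ((lo + hi) / 2) 0 ≤ overlap_chars then
      pvBSearch pref total overlap_chars lo ((lo + hi) / 2)
    else pvBSearch pref total overlap_chars ((lo + hi) / 2 + 1) hi
  else lo
termination_by hi - lo
decreasing_by all_goals omega

def build_overlap_buffer_py_alt (prev_buffer : List String) (overlap_chars : Int) : List String × Int :=
  if overlap_chars ≤ 0 ∨ prev_buffer = [] then ([], 0)
  else
    let pt := prev_buffer.foldl pvPrefStep ([0], 0)
    let lo := pvBSearch pt.1 pt.2 overlap_chars 0 (prev_buffer.length - 1)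
    -- prev_buffer[lo:] with 0 ≤ lo is List.drop; pref[lo] is in range, getD exact
    (prev_buffer.drop lo, pt.2 - pt.1.getD lo 0)

-- ===== PRECONDITION & SPEC =====
def Spec_build_overlap_buffer_py (prev_buffer : List String) (overlap_chars : Int) (out : List String × Int) : Prop := out = build_overlap_buffer_py_alt prev_buffer overlap_chars
instance (prev_buffer : List String) (overlap_chars : Int) (out : List String × Int) : Decidable (Spec_build_overlap_buffer_py prev_buffer overlap_chars out) := by unfold Spec_build_overlap_buffer_py; infer_instance

-- ===== CLAIM (what is proved, stated in full; the proofs are below) =====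
def Claim_equal_build_overlap_buffer_py : Prop := ∀ (prev_buffer : List String) (overlap_chars : Int), Dom_build_overlap_buffer_py prev_buffer overlap_chars → Spec_build_overlap_buffer_py prev_buffer overlap_chars (build_overlap_buffer_py prev_buffer overlap_chars)

-- ===== LEMMAS AND PROOFS =====

-- cost of one sentence
def pvL (s : String) : Int := PySem.Str.len s + 1

-- prefix sum of costs of the first i sentences
def pvPref (pb : List String) (i : Nat) : Int := ((pb.take i).map pvL).sum

-- the prefix table B's loop appends (acc running total)
def pvTable : List String → Int → List Int
  | [], _ => []
  | s :: r, acc => (acc + PySem.Str.len s + 1) :: pvTable r (acc + PySem.Str.len s + 1)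

-- the start index, as A's downward greedy from i
def pvIdxGo (pb : List String) (oc : Int) : Nat → Nat
  | 0 => 0
  | i + 1 => if pvPref pb pb.length - pvPref pb i ≤ oc then pvIdxGo pb oc i else i + 1

theorem pvL_pos (s : String) : 1 ≤ pvL s := by
  simp [pvL]

theorem pvPref_succ (pb : List String) (i : Nat) (h : i < pb.length) :
    pvPref pb (i + 1) = pvPref pb i + pvL pb[i] := by
  unfold pvPref
  rw [List.map_take, List.map_take, List.sum_take_succ _ i (by simpa using h),
    List.getElem_map]

theorem pvPref_mono (pb : List String) {i j : Nat} (h : i ≤ j) :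
    pvPref pb i ≤ pvPref pb j := by
  induction j with
  | zero =>
    have : i = 0 := by omega
    subst this; exact le_refl _
  | succ k ih =>
    rcases Nat.lt_or_ge i (k+1) with hi | hi
    · have h1 := ih (by omega)
      rcases Nat.lt_or_ge k pb.length with hk | hk
      · have h2 := pvL_pos pb[k]
        rw [pvPref_succ pb k hk]; omega
      · have heq : pvPref pb (k+1) = pvPref pb k := by
          unfold pvPref
          rw [List.take_of_length_le (by omega), List.take_of_length_le (by omega)]
        omega
    · have : i = k + 1 := by omega
      subst this; exact le_refl _

theorem pvP_mono (pb : List String) (oc : Int) {i j : Nat} (h : i ≤ j)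
    (hp : pvPref pb pb.length - pvPref pb i ≤ oc) :
    pvPref pb pb.length - pvPref pb j ≤ oc := by
  have := pvPref_mono pb h
  omega

theorem pvIdxGo_le (pb : List String) (oc : Int) (i : Nat) : pvIdxGo pb oc i ≤ i := by
  induction i with
  | zero => simp [pvIdxGo]
  | succ k ih => rw [pvIdxGo]; split <;> omega

theorem pvIdxGo_not_below (pb : List String) (oc : Int) (i : Nat) :
    ∀ j < pvIdxGo pb oc i, ¬ (pvPref pb pb.length - pvPref pb j ≤ oc) := by
  induction i with
  | zero => simp [pvIdxGo]
  | succ k ih =>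
    rw [pvIdxGo]; split
    · exact ih
    · intro j hj hc
      next hk => exact hk (pvP_mono pb oc (by omega) hc)

theorem pvIdxGo_sat (pb : List String) (oc : Int) (i : Nat) :
    pvPref pb pb.length - pvPref pb (pvIdxGo pb oc i) ≤ oc ∨ pvIdxGo pb oc i = i := by
  induction i with
  | zero => simp [pvIdxGo]
  | succ k ih =>
    rw [pvIdxGo]; split
    · rcases ih with h | h
      · exact Or.inl h
      · next hk => exact Or.inl (by rw [h]; exact hk)
    · exact Or.inr rfl

-- any index satisfying the greedy characterization equals pvIdxGo
theorem pv_unique (pb : List String) (oc : Int) (i r : Nat) (hr1 : r ≤ i)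
    (hr2 : ∀ j < r, ¬ (pvPref pb pb.length - pvPref pb j ≤ oc))
    (hr3 : pvPref pb pb.length - pvPref pb r ≤ oc ∨ r = i) :
    r = pvIdxGo pb oc i := by
  have hg1 := pvIdxGo_le pb oc i
  have hg2 := pvIdxGo_not_below pb oc i
  have hg3 := pvIdxGo_sat pb oc i
  rcases Nat.lt_trichotomy r (pvIdxGo pb oc i) with h | h | h
  · exfalso
    rcases hr3 with hp | hi
    · exact hg2 r h hp
    · omega
  · exact h
  · exfalso
    rcases hg3 with hp | hi
    · exact hr2 _ h hp
    · omega

-- A's loop from state i computes the greedy index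
theorem pvLoopA_spec (pb : List String) (oc : Int) :
    ∀ i, i < pb.length →
      pvLoopA oc ((pb.take i).reverse) (pb.drop i) (pvPref pb pb.length - pvPref pb i)
        = (pb.drop (pvIdxGo pb oc i), pvPref pb pb.length - pvPref pb (pvIdxGo pb oc i)) := by
  intro i
  induction i with
  | zero => intro _; simp [pvLoopA, pvIdxGo]
  | succ k ih =>
    intro h
    have hk : k < pb.length := by omega
    have htake : pb.take (k+1) = pb.take k ++ [pb[k]] := by
      rw [List.take_add_one, List.getElem?_eq_getElem hk]; rfl
    have hdrop : pb[k] :: pb.drop (k+1) = pb.drop k := List.getElem_cons_drop hk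
    have hdne : pb.drop (k+1) ≠ [] := by
      simp [List.drop_eq_nil_iff]; omega
    have hsum : pvPref pb pb.length - pvPref pb (k+1) + (PySem.Str.len pb[k] + 1)
        = pvPref pb pb.length - pvPref pb k := by
      have h1 := pvPref_succ pb k hk
      unfold pvL at h1
      omega
    rw [htake]
    simp only [List.reverse_append, List.reverse_cons, List.reverse_nil, List.nil_append,
      List.cons_append, pvLoopA]
    by_cases hP : pvPref pb pb.length - pvPref pb k ≤ oc
    · have hcond : ¬ (pvPref pb pb.length - pvPref pb (k+1) + (PySem.Str.len pb[k] + 1) > oc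
          ∧ pb.drop (k+1) ≠ []) := by
        rw [hsum]; intro hcc; omega
      rw [if_neg hcond, hsum, hdrop, pvIdxGo, if_pos hP]
      exact ih hk
    · have hcond : pvPref pb pb.length - pvPref pb (k+1) + (PySem.Str.len pb[k] + 1) > oc
          ∧ pb.drop (k+1) ≠ [] := by
        rw [hsum]; exact ⟨by omega, hdne⟩
      rw [if_pos hcond, pvIdxGo, if_neg hP]

-- the prefix-sum foldl builds pvTable
theorem pvPrefStep_foldl : ∀ (pb : List String) (p : List Int) (acc : Int),
    pb.foldl pvPrefStep (p, acc)
      = (p ++ pvTable pb acc, acc + pvPref pb pb.length) := by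
  intro pb
  induction pb with
  | nil => intro p acc; simp [pvPref, pvTable]
  | cons s rest ih =>
    intro p acc
    have hstep : pvPref (s :: rest) (rest.length + 1) = pvL s + pvPref rest rest.length := by
      simp [pvPref, pvL]
    simp only [List.foldl_cons, pvPrefStep, ih, pvTable, List.length_cons, hstep]
    refine Prod.ext ?_ ?_ <;> dsimp only
    · simp
    · unfold pvL; ring

-- reading the table is reading pvPref
theorem pvTable_getD : ∀ (pb : List String) (acc : Int) (i : Nat), i < pb.length →
    (pvTable pb acc).getD i 0 = acc + pvPref pb (i + 1) := by
  intro pb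
  induction pb with
  | nil => intro acc i h; simp at h
  | cons s rest ih =>
    intro acc i h
    cases i with
    | zero => simp [pvTable, pvPref, pvL, add_assoc]
    | succ k =>
      have hk : k < rest.length := by simpa using h
      have hstep : pvPref (s :: rest) (k + 2) = pvL s + pvPref rest (k + 1) := by
        simp [pvPref, pvL]
      simp only [pvTable, List.getD_cons_succ, ih _ k hk, hstep]
      unfold pvL; ring

theorem pref_table_getD (pb : List String) (i : Nat) (h : i ≤ pb.length) :
    (((0:Int) :: pvTable pb 0).getD i 0) = pvPref pb i := by
  cases i with
  | zero => simp [pvPref]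
  | succ k =>
    have hk : k < pb.length := by omega
    rw [List.getD_cons_succ, pvTable_getD pb 0 k hk]
    ring

-- the binary search lands on the greedy index
theorem pvBSearch_spec (pb : List String) (oc : Int) :
    ∀ d lo hi, hi - lo ≤ d → lo ≤ hi → hi ≤ pb.length - 1 →
      (∀ j < lo, ¬ (pvPref pb pb.length - pvPref pb j ≤ oc)) →
      (pvPref pb pb.length - pvPref pb hi ≤ oc ∨ hi = pb.length - 1) →
      pvBSearch ((0:Int) :: pvTable pb 0) (pvPref pb pb.length) oc lo hi
        = pvIdxGo pb oc (pb.length - 1) := by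
  intro d
  induction d with
  | zero =>
    intro lo hi hd hlh hhi hlow hsat
    have : lo = hi := by omega
    subst this
    rw [pvBSearch, if_neg (by omega)]
    exact pv_unique pb oc (pb.length - 1) lo hhi hlow hsat
  | succ d ih =>
    intro lo hi hd hlh hhi hlow hsat
    rw [pvBSearch]
    split
    · next hlt =>
      have hmid1 : lo ≤ (lo + hi) / 2 := by omega
      have hmid2 : (lo + hi) / 2 < hi := by omega
      rw [pref_table_getD pb ((lo + hi) / 2) (by omega)]
      split
      · next hP =>
        exact ih lo ((lo + hi) / 2) (by omega) (by omega) (by omega) hlow (Or.inl hP)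
      · next hNP =>
        refine ih ((lo + hi) / 2 + 1) hi (by omega) (by omega) hhi ?_ hsat
        intro j hj hP
        rcases Nat.lt_or_ge j lo with hjl | hjl
        · exact hlow j hjl hP
        · exact hNP (pvP_mono pb oc (by omega) hP)
    · next hge =>
      have : lo = hi := by omega
      subst this
      exact pv_unique pb oc (pb.length - 1) lo hhi hlow hsat

-- ===== VERDICT (by name: the statement is the Claim_ definition above) =====
theorem build_overlap_buffer_py_spec : Claim_equal_build_overlap_buffer_py := by
  intro pb oc _dom
  unfold Spec_build_overlap_buffer_py build_overlap_buffer_py build_overlap_buffer_py_alt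
  by_cases hbase : oc ≤ 0 ∨ pb = []
  · rw [if_pos hbase, if_pos hbase]
  · rw [if_neg hbase, if_neg hbase]
    push Not at hbase
    obtain ⟨hoc, hne⟩ := hbase
    have hn : 1 ≤ pb.length := by
      cases pb with
      | nil => exact absurd rfl hne
      | cons a l => simp
    have hk : pb.length - 1 < pb.length := by omega
    have hfold : pb.foldl pvPrefStep ([0], 0)
        = ((0:Int) :: pvTable pb 0, (0:Int) + pvPref pb pb.length) := by
      rw [pvPrefStep_foldl pb [0] 0]; rfl
    have hdrop : pb.drop (pb.length - 1) = [pb[pb.length - 1]] := by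
      have h1 := List.getElem_cons_drop hk
      have h2 : pb.drop (pb.length - 1 + 1) = ([] : List String) := by
        rw [List.drop_eq_nil_iff]; omega
      rw [h2] at h1
      exact h1.symm
    have hrev : pb.reverse = pb[pb.length - 1] :: (pb.take (pb.length - 1)).reverse := by
      conv_lhs => rw [← List.take_append_drop (pb.length - 1) pb]
      rw [hdrop]
      simp
    have hsuf : (0:Int) + (PySem.Str.len pb[pb.length - 1] + 1)
        = pvPref pb pb.length - pvPref pb (pb.length - 1) := by
      have h1 := pvPref_succ pb (pb.length - 1) hk
      have h2 : pb.length - 1 + 1 = pb.length := by omega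
      rw [h2] at h1
      unfold pvL at h1
      omega
    have hA : pvLoopA oc pb.reverse [] 0
        = (pb.drop (pvIdxGo pb oc (pb.length - 1)),
           pvPref pb pb.length - pvPref pb (pvIdxGo pb oc (pb.length - 1))) := by
      rw [hrev]
      simp only [pvLoopA, ne_eq, not_true_eq_false, and_false, if_false]
      rw [show ([pb[pb.length - 1]] : List String) = pb.drop (pb.length - 1) from hdrop.symm,
        hsuf]
      exact pvLoopA_spec pb oc (pb.length - 1) hk
    rw [hA, hfold]
    simp only [zero_add]
    rw [pvBSearch_spec pb oc (pb.length - 1) 0 (pb.length - 1) (by omega) (by omega)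
      (le_refl _) (by omega) (Or.inr rfl)]
    rw [pref_table_getD pb _ (by have := pvIdxGo_le pb oc (pb.length - 1); omega)]
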